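-- pv_equiv track=rewrite | github.com/oigomezz/Retos | Hackerearth/Basic-Programming/Recursion/Movement-in-arrays/solution.py | power_mat
-- ===== SOURCE A (Python) =====
-- from typing import List
--
-- def mul_mat(a: List[List[bool]], b: List[List[bool]]) -> List[List[bool]]:
--     r1, r2 = len(a), len(b)
--     _, c2 = len(a[0]), len(b[0])
--     ans = [[False] * c2 for _ in range(r1)]
--     for i in range(r1):
--         for j in range(c2):
--             for k in range(r2):
--                 if a[i][k] and b[k][j]:
--                     ans[i][j] = True
--                     break
--     return ans
--
-- def power_mat(mat: List[List[bool]], p: int) -> List[List[bool]]: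
--     if p == 1:
--         return mat
--     ans = power_mat(mat, p >> 1)
--     ans = mul_mat(ans, ans)
--     if p % 2:
--         ans = mul_mat(mat, ans)
--     return ans
-- ===== SOURCE B (Python) =====
-- from typing import List, Optional
--
-- def mul_mat(a: List[List[bool]], b: List[List[bool]]) -> List[List[bool]]:
--     r1, r2 = len(a), len(b)
--     _, c2 = len(a[0]), len(b[0])
--     ans = [[False] * c2 for _ in range(r1)]
--     for i in range(r1):
--         for j in range(c2):
--             for k in range(r2):
--                 if a[i][k] and b[k][j]:
--                     ans[i][j] = True
--                     break
--     return ans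
--
-- def power_mat(mat: List[List[bool]], p: int) -> List[List[bool]]:
--     # iterative binary exponentiation over the bits of p
--     result: Optional[List[List[bool]]] = None
--     base = mat
--     while p > 0:
--         if p & 1:
--             result = base if result is None else mul_mat(result, base)
--         p >>= 1
--         if p:
--             base = mul_mat(base, base)
--     return result
-- ===== Notes on version B (the rewrite author's own statement) =====
-- stated objective: alternative
-- what changed: Replaced the recursive top-down exponentiation-by-squaring with an explicit iterative loop over the bits of p that maintains a running base and an optional accumulator (no identity matrix), keeping the same mul_mat helper.
-- outside the precondition, e.g. on power_mat([[True]], 0): A does not finish within the time limit, B returns None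
import Mathlib
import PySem

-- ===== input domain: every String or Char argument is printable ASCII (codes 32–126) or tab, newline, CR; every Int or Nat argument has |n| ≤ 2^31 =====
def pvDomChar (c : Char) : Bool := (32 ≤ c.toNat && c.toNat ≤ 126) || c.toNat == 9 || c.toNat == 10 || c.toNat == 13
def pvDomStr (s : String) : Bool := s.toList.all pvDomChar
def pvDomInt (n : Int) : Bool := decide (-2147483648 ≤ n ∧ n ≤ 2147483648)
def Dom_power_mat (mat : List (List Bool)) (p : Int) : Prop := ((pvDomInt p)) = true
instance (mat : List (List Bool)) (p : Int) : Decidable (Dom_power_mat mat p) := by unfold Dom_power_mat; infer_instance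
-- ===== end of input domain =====

-- B replaces A's recursive exponentiation-by-squaring with an iterative loop over the
-- bits of p (running base + optional accumulator, no identity matrix); same mul_mat helper.

-- ===== PORT A =====
-- mul_mat: ans[i][j] = True iff some k < len(b) has a[i][k] and b[k][j] (the inner
-- loop with break is exactly List.any over range); in-range indexing ported with getD
-- (exact on Pre_, where every access Python performs is in range).
def mulMat (a b : List (List Bool)) : List (List Bool) :=
  let r1 := a.length
  let r2 := b.length
  let c2 := (b.headD []).length
  (List.range r1).map (fun i =>
    (List.range c2).map (fun j =>
      (List.range r2).any (fun k =>
        ((a.getD i []).getD k false) && ((b.getD k []).getD j false))))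

-- A's recursion on p (p == 1 base case, recurse on p >> 1).  Python diverges for
-- p ≤ 0 (excluded by Pre_); the port returns [] at fuel 0 there.
def powAuxA (mat : List (List Bool)) : Nat → List (List Bool)
  | 0 => []
  | 1 => mat
  | (n+2) =>
    let ans := powAuxA mat ((n+2)/2)
    let ans2 := mulMat ans ans
    if (n+2) % 2 = 1 then mulMat mat ans2 else ans2
  decreasing_by omega

def power_mat (mat : List (List Bool)) (p : Int) : List (List Bool) :=
  powAuxA mat p.toNat

-- ===== PORT B =====
-- iterative loop over the bits of n; result is an Option (None until the first set bit).
def powAuxB (base : List (List Bool)) (result : Option (List (List Bool))) (n : Nat) :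
    Option (List (List Bool)) :=
  if n = 0 then result
  else
    let result' := if n % 2 = 1 then
        some (match result with
              | none => base
              | some r => mulMat r base)
      else result
    let n' := n / 2
    let base' := if n' = 0 then base else mulMat base base
    powAuxB base' result' n'
  decreasing_by omega

-- Python B returns None when p ≤ 0 (outside Pre_); the port maps that None to [].
def power_mat_alt (mat : List (List Bool)) (p : Int) : List (List Bool) :=
  (powAuxB mat none p.toNat).getD []

-- ===== PRECONDITION & SPEC =====
-- Pre_ excludes p < 1, where A recurses forever (RecursionError), and, for p ≥ 2,
-- matrices that are not rectangular r×c with 1 ≤ r ≤ c, on which mul_mat's indexing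
-- raises IndexError except when data-dependent short-circuiting happens to avoid the
-- out-of-range access.
def Pre_power_mat (mat : List (List Bool)) (p : Int) : Prop :=
  1 ≤ p ∧ (p = 1 ∨ (mat ≠ [] ∧ ∀ row ∈ mat,
    row.length = (mat.headD []).length ∧ mat.length ≤ row.length))
instance (mat : List (List Bool)) (p : Int) : Decidable (Pre_power_mat mat p) := by
  unfold Pre_power_mat; infer_instance

def pvWitness_power_mat : List (List Bool) × Int := ([[true, false], [false, true]], 3)

def Spec_power_mat (mat : List (List Bool)) (p : Int) (out : List (List Bool)) : Prop := out = power_mat_alt mat p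
instance (mat : List (List Bool)) (p : Int) (out : List (List Bool)) : Decidable (Spec_power_mat mat p out) := by unfold Spec_power_mat; infer_instance

-- ===== CLAIM (what is proved, stated in full; the proofs are below) =====
def Claim_equal_power_mat : Prop := ∀ (mat : List (List Bool)) (p : Int), Dom_power_mat mat p → Pre_power_mat mat p → Spec_power_mat mat p (power_mat mat p)

-- ===== LEMMAS AND PROOFS =====

-- a matrix with r rows, each of length c
def GoodM (r c : Nat) (m : List (List Bool)) : Prop :=
  m.length = r ∧ ∀ row ∈ m, row.length = c

theorem mulMat_length (a b : List (List Bool)) : (mulMat a b).length = a.length := by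
  simp [mulMat]

theorem good_head {r c : Nat} {b : List (List Bool)} (hb : GoodM r c b) (hr : 0 < r) :
    (b.headD []).length = c := by
  obtain ⟨hlen, hrow⟩ := hb
  cases b with
  | nil => simp at hlen; omega
  | cons x xs => exact hrow x (by simp)

theorem good_mul {r c : Nat} {a b : List (List Bool)} (hr : 0 < r)
    (ha : GoodM r c a) (hb : GoodM r c b) : GoodM r c (mulMat a b) := by
  refine ⟨by simp [mulMat, ha.1], ?_⟩
  intro row hrow
  simp only [mulMat, List.mem_map, List.mem_range] at hrow
  obtain ⟨i, _, hrw⟩ := hrow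
  subst hrw
  simp only [List.length_map, List.length_range, List.headD_eq_head?_getD] at *
  rw [← List.headD_eq_head?_getD, good_head hb hr]

theorem mulMat_eq_map (a b : List (List Bool)) :
    mulMat a b = (List.range a.length).map (fun i =>
      (List.range ((b.headD []).length)).map (fun j =>
        (List.range b.length).any (fun k =>
          ((a.getD i []).getD k false) && ((b.getD k []).getD j false)))) := rfl

theorem mulMat_entry (a b : List (List Bool)) (i k : Nat)
    (hi : i < a.length) (hk : k < (b.headD []).length) :
    ((mulMat a b).getD i []).getD k false =
      (List.range b.length).any (fun t =>
        ((a.getD i []).getD t false) && ((b.getD t []).getD k false)) := by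
  simp only [List.headD_eq_head?_getD] at hk
  simp [mulMat, List.getD, hi, hk]

-- associativity of mulMat on rectangular r×c matrices with r ≤ c
theorem mulMat_assoc {r c : Nat} {a b d : List (List Bool)} (hr : 0 < r) (hrc : r ≤ c)
    (ha : GoodM r c a) (hb : GoodM r c b) (hd : GoodM r c d) :
    mulMat (mulMat a b) d = mulMat a (mulMat b d) := by
  have hab := good_mul hr ha hb
  have hbd := good_mul hr hb hd
  rw [mulMat_eq_map (mulMat a b) d, mulMat_eq_map a (mulMat b d)]
  rw [ha.1, good_head hd hr, good_head hbd hr, hd.1, mulMat_length b d, hb.1, mulMat_length a b, ha.1]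
  apply List.map_congr_left
  intro i hi
  apply List.map_congr_left
  intro j hj
  rw [List.mem_range] at hi hj
  have hia : i < a.length := by rw [ha.1]; omega
  rw [Bool.eq_iff_iff]
  simp only [List.any_eq_true, List.mem_range, Bool.and_eq_true]
  constructor
  · rintro ⟨k, hk, hX, hD⟩
    rw [mulMat_entry a b i k hia (by rw [good_head hb hr]; omega), hb.1] at hX
    simp only [List.any_eq_true, List.mem_range, Bool.and_eq_true] at hX
    obtain ⟨l, hl, hA, hB⟩ := hX
    refine ⟨l, hl, hA, ?_⟩
    rw [mulMat_entry b d l j (by rw [hb.1]; omega) (by rw [good_head hd hr]; omega), hd.1]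
    simp only [List.any_eq_true, List.mem_range, Bool.and_eq_true]
    exact ⟨k, hk, hB, hD⟩
  · rintro ⟨l, hl, hA, hY⟩
    rw [mulMat_entry b d l j (by rw [hb.1]; omega) (by rw [good_head hd hr]; omega), hd.1] at hY
    simp only [List.any_eq_true, List.mem_range, Bool.and_eq_true] at hY
    obtain ⟨k, hk, hB, hD⟩ := hY
    refine ⟨k, hk, ?_, hD⟩
    rw [mulMat_entry a b i k hia (by rw [good_head hb hr]; omega), hb.1]
    simp only [List.any_eq_true, List.mem_range, Bool.and_eq_true]
    exact ⟨l, hl, hA, hB⟩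

-- pwM mat k = mat^(k+1)
def pwM (mat : List (List Bool)) : Nat → List (List Bool)
  | 0 => mat
  | (k+1) => mulMat mat (pwM mat k)

theorem good_pw {r c : Nat} {mat : List (List Bool)} (hr : 0 < r)
    (hm : GoodM r c mat) (k : Nat) : GoodM r c (pwM mat k) := by
  induction k with
  | zero => exact hm
  | succ k ih => exact good_mul hr hm ih

theorem mul_pw {r c : Nat} {mat : List (List Bool)} (hr : 0 < r) (hrc : r ≤ c)
    (hm : GoodM r c mat) (x y : Nat) :
    mulMat (pwM mat x) (pwM mat y) = pwM mat (x + y + 1) := by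
  induction x with
  | zero => show mulMat mat (pwM mat y) = pwM mat (0 + y + 1); rw [Nat.zero_add]; rfl
  | succ x ih =>
    show mulMat (mulMat mat (pwM mat x)) (pwM mat y) = _
    rw [mulMat_assoc hr hrc hm (good_pw hr hm x) (good_pw hr hm y), ih]
    show pwM mat (x + y + 1 + 1) = _
    congr 1
    omega

theorem powAuxA_eq_pw {r c : Nat} {mat : List (List Bool)} (hr : 0 < r) (hrc : r ≤ c)
    (hm : GoodM r c mat) : ∀ n, 1 ≤ n → powAuxA mat n = pwM mat (n - 1) := by
  intro n
  induction n using Nat.strong_induction_on with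
  | _ n ih =>
    intro hn
    match n, hn with
    | 1, _ => rw [powAuxA]; rfl
    | (n+2), _ =>
      rw [powAuxA]
      have h2 : (n+2)/2 < n+2 := by omega
      have h1 : 1 ≤ (n+2)/2 := by omega
      rw [ih _ h2 h1, mul_pw hr hrc hm]
      by_cases hpar : (n+2) % 2 = 1
      · rw [if_pos hpar]
        have hmm : mulMat mat (pwM mat ((n+2)/2 - 1 + ((n+2)/2 - 1) + 1)) =
            pwM mat ((n+2)/2 - 1 + ((n+2)/2 - 1) + 1 + 1) := rfl
        rw [hmm]
        congr 1
        omega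
      · rw [if_neg hpar]
        congr 1
        omega

-- B-side invariant: powAuxB with base = mat^(e+1) and accumulator holding f factors
-- of mat returns mat^(f + (e+1)*n) (as some (pwM …)) whenever f + n ≥ 1.
theorem powAuxB_inv {r c : Nat} {mat : List (List Bool)} (hr : 0 < r) (hrc : r ≤ c)
    (hm : GoodM r c mat) :
    ∀ n e f (res : Option (List (List Bool))),
      (f = 0 ∧ res = none ∨ ∃ f', f = f' + 1 ∧ res = some (pwM mat f')) →
      1 ≤ f + n →
      powAuxB (pwM mat e) res n = some (pwM mat (f + (e+1)*n - 1)) := by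
  intro n
  induction n using Nat.strong_induction_on with
  | _ n ih =>
    intro e f res hres hfn
    by_cases hn : n = 0
    · subst hn
      rcases hres with ⟨hf, hres⟩ | ⟨f', hf, hres⟩
      · omega
      · subst hres; subst hf
        rw [powAuxB.eq_def, if_pos rfl]
        have hidx : f' + 1 + (e + 1) * 0 - 1 = f' := by omega
        rw [hidx]
    · rw [powAuxB.eq_def, if_neg hn]
      dsimp only
      set m := n / 2 with hm2
      have hmn : m < n := by omega
      have hsq : mulMat (pwM mat e) (pwM mat e) = pwM mat (e + e + 1) :=
        mul_pw hr hrc hm e e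
      have hpar : n % 2 = 1 ∨ n % 2 = 0 := by omega
      rcases hpar with hpar | hpar
      · rw [if_pos hpar]
        rcases hres with ⟨hf, hres⟩ | ⟨f', hf, hres⟩ <;> subst hres <;> subst hf <;> dsimp only
        · -- accumulator was empty: it becomes base = pwM mat e
          by_cases hm0 : m = 0
          · rw [if_pos hm0, hm0, powAuxB.eq_def, if_pos rfl]
            have hn1 : n = 1 := by omega
            subst hn1
            have hidx : e = 0 + (e + 1) * 1 - 1 := by omega
            rw [← hidx]
          · rw [if_neg hm0, hsq]
            rw [ih m hmn (e + e + 1) (e + 1) _ (Or.inr ⟨e, rfl, rfl⟩) (by omega)]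
            have hne : n = 2 * m + 1 := by omega
            have hidx : e + 1 + (e + e + 1 + 1) * m - 1 = 0 + (e + 1) * n - 1 := by
              have hexp : (e + 1) * n = (e + e + 1 + 1) * m + e + 1 := by rw [hne]; ring
              omega
            rw [hidx]
        · -- accumulator held f'+1 factors: it gains e+1 more
          rw [show mulMat (pwM mat f') (pwM mat e) = pwM mat (f' + e + 1) from
            mul_pw hr hrc hm f' e]
          by_cases hm0 : m = 0
          · rw [if_pos hm0, hm0, powAuxB.eq_def, if_pos rfl]
            have hn1 : n = 1 := by omega
            subst hn1
            have hidx : f' + e + 1 = f' + 1 + (e + 1) * 1 - 1 := by omega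
            rw [← hidx]
          · rw [if_neg hm0, hsq]
            rw [ih m hmn (e + e + 1) (f' + e + 2) _ (Or.inr ⟨f' + e + 1, rfl, rfl⟩)
              (by omega)]
            have hne : n = 2 * m + 1 := by omega
            have hidx : f' + e + 2 + (e + e + 1 + 1) * m - 1 = f' + 1 + (e + 1) * n - 1 := by
              have hexp : (e + 1) * n = (e + e + 1 + 1) * m + e + 1 := by rw [hne]; ring
              omega
            rw [hidx]
      · rw [if_neg (by omega : ¬ n % 2 = 1)]
        have hm1 : 1 ≤ m := by omega
        rw [if_neg (by omega : ¬ m = 0), hsq]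
        rw [ih m hmn (e + e + 1) f res hres (by omega)]
        have hne : n = 2 * m := by omega
        have hidx : f + (e + e + 1 + 1) * m - 1 = f + (e + 1) * n - 1 := by
          have hexp : (e + 1) * n = (e + e + 1 + 1) * m := by rw [hne]; ring
          omega
        rw [hidx]

-- ===== VERDICT (by name: the statement is the Claim_ definition above) =====
theorem power_mat_spec : Claim_equal_power_mat := by
  intro mat p _ hpre
  unfold Spec_power_mat power_mat power_mat_alt
  obtain ⟨hp1, hcase⟩ := hpre
  rcases hcase with hcase | ⟨hne, hrect⟩
  · -- p = 1: both return mat, whatever the matrix shape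
    subst hcase
    rw [show (1 : Int).toNat = 1 from rfl]
    rw [powAuxB.eq_def, if_neg one_ne_zero]
    dsimp only
    norm_num
    rw [powAuxB.eq_def, if_pos rfl]
    rw [powAuxA]
    rfl
  · -- rectangular r×c matrix with 1 ≤ r ≤ c
    set r := mat.length with hrdef
    set c := (mat.headD []).length with hcdef
    have hr : 0 < r := by
      cases mat with
      | nil => exact absurd rfl hne
      | cons x xs => simp [hrdef]
    have hm : GoodM r c mat := ⟨rfl, fun row hrow => (hrect row hrow).1⟩
    have hrc : r ≤ c := by
      have hhead : mat.headD [] ∈ mat := by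
        cases mat with
        | nil => exact absurd rfl hne
        | cons x xs => simp
      have := hrect _ hhead
      omega
    have hn : 1 ≤ p.toNat := by omega
    rw [powAuxA_eq_pw hr hrc hm p.toNat hn]
    rw [show powAuxB mat none p.toNat = some (pwM mat (0 + (0+1)*p.toNat - 1)) from
      powAuxB_inv hr hrc hm p.toNat 0 0 none (Or.inl ⟨rfl, rfl⟩) (by omega)]
    simp
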